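-- pv_equiv track=rewrite | github.com/padparadscho/aoc-2023 | 14/main.py | calculate_load
-- ===== SOURCE A (Python) =====
-- from typing import List
--
-- def calculate_load(grid: List[List[str]]) -> int:
--     # Calculate total load on north support beams
--     rows = len(grid)
--     total = 0
--
--     for row in range(rows):
--         for col in range(len(grid[row])):
--             if grid[row][col] == 'O':
--                 total += rows - row
--
--     return total
-- ===== SOURCE B (Python) =====
-- def calculate_load(grid):
--     # Staircase/prefix-sum accumulation: a rock in row r is counted once for each
--     # of the (rows - r) prefixes that contain it, so summing the running count of
--     # rocks seen so far over all rows gives the total load. No weights, no multiply.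
--     total = 0
--     running = 0
--     for row in grid:
--         running += row.count('O')
--         total += running
--     return total
-- ===== Notes on version B (the rewrite author's own statement) =====
-- stated objective: alternative
-- what changed: Replaces per-cell weight accumulation (total += rows - row) with a prefix-sum staircase: maintain a running count of rocks seen so far and add that running count once per row, eliminating all weight arithmetic and the inner index loop.
import Mathlib
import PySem

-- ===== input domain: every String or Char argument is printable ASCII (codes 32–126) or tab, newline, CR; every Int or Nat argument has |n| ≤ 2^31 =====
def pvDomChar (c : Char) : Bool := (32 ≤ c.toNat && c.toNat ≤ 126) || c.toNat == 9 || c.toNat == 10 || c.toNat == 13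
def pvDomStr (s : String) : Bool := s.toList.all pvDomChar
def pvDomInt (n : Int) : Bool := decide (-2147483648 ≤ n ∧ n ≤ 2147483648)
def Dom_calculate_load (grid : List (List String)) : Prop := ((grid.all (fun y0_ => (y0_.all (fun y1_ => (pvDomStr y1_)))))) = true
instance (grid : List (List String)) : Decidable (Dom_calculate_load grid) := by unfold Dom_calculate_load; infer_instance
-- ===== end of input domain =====

-- B replaces A's weighted per-cell accumulation by a prefix-sum staircase (running rock count added once per row): an alternative decomposition, same cost.

-- ===== PORT A =====
def calculate_load (grid : List (List String)) : Int :=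
  let rows : Int := grid.length
  (PySem.List.pyRange 0 rows 1).foldl (fun total row =>
    (PySem.List.pyRange 0 ((PySem.List.pyGetD grid row []).length : Int) 1).foldl (fun total col =>
      if PySem.List.pyGetD (PySem.List.pyGetD grid row []) col "" == "O" then
        total + (rows - row)
      else total) total) 0

-- ===== PORT B =====
def calculate_load_alt (grid : List (List String)) : Int :=
  (grid.foldl (fun (tr : Int × Int) row =>
      let running := tr.2 + (PySem.List.count row "O" : Int)
      (tr.1 + running, running)) (0, 0)).1

-- ===== PRECONDITION & SPEC =====
def Spec_calculate_load (grid : List (List String)) (out : Int) : Prop := out = calculate_load_alt grid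
instance (grid : List (List String)) (out : Int) : Decidable (Spec_calculate_load grid out) := by unfold Spec_calculate_load; infer_instance

-- ===== CLAIM (what is proved, stated in full; the proofs are below) =====
def Claim_equal_calculate_load : Prop := ∀ (grid : List (List String)), Dom_calculate_load grid → Spec_calculate_load grid (calculate_load grid)

-- ===== LEMMAS AND PROOFS =====

-- inner column loop of A = weight * (count of "O" in the row)
theorem pv_inner (r : List String) (w t0 : Int) :
    (PySem.List.pyRange 0 (r.length : Int) 1).foldl
      (fun total col => if PySem.List.pyGetD r col "" == "O" then total + w else total) t0
    = t0 + w * (PySem.List.count r "O" : Int) := by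
  rw [PySem.List.foldl_pyRange_zero_pyGetD' r "" (fun total x => if x == "O" then total + w else total) t0]
  rw [PySem.List.foldl_if_eq_foldl_filter]
  have hconst : ∀ (l : List String) (t : Int),
      l.foldl (fun total _ => total + w) t = t + w * l.length := by
    intro l
    induction l with
    | nil => simp
    | cons x xs ih => intro t; simp [ih]; ring
  rw [hconst]
  simp [PySem.List.count_eq, List.count_eq_countP, List.countP_eq_length_filter]

-- outer loop of A over enumerate, generalized in start index and accumulator
theorem pv_outer (R : Int) (xs : List (List String)) (s t0 : Int) :
    (PySem.List.enumerate xs s).foldl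
      (fun total p =>
        (PySem.List.pyRange 0 ((p.2).length : Int) 1).foldl
          (fun total col => if PySem.List.pyGetD p.2 col "" == "O" then total + (R - p.1) else total)
          total) t0
    = t0 + ((PySem.List.enumerate xs s).map (fun p => (R - p.1) * (PySem.List.count p.2 "O" : Int))).sum := by
  induction xs generalizing s t0 with
  | nil => simp [PySem.List.enumerate_nil]
  | cons x xs ih =>
      rw [PySem.List.enumerate_cons]
      simp only [List.foldl_cons, List.map_cons, List.sum_cons]
      rw [pv_inner, ih]
      ring

-- B's running-count fold = the weighted sum, generalized over start index and both accumulators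
theorem pv_fold (xs : List (List String)) (s : Int) (t0 run0 : Int) :
    (xs.foldl (fun (tr : Int × Int) row =>
        let running := tr.2 + (PySem.List.count row "O" : Int)
        (tr.1 + running, running)) (t0, run0)).1
    = t0 + (xs.length : Int) * run0
        + ((PySem.List.enumerate xs s).map
            (fun p => ((s + (xs.length : Int)) - p.1) * (PySem.List.count p.2 "O" : Int))).sum := by
  induction xs generalizing s t0 run0 with
  | nil => simp [PySem.List.enumerate_nil]
  | cons x xs ih =>
      rw [PySem.List.enumerate_cons]
      simp only [List.foldl_cons, List.map_cons, List.sum_cons, List.length_cons]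
      have hfun : (fun (p : Int × List String) =>
            ((s + ((xs.length : Int) + 1)) - p.1) * (PySem.List.count p.2 "O" : Int))
          = (fun (p : Int × List String) =>
            (((s + 1) + (xs.length : Int)) - p.1) * (PySem.List.count p.2 "O" : Int)) := by
        funext p; ring
      rw [ih (s + 1)]
      push_cast
      rw [hfun]
      ring

theorem pv_eq (grid : List (List String)) : calculate_load grid = calculate_load_alt grid := by
  have hA := pv_outer (grid.length : Int) grid 0 0
  have hB := pv_fold grid 0 0 0
  rw [PySem.List.enumerate_eq_map_pyRange grid [], List.foldl_map, List.map_map] at hA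
  simp only [zero_add] at hB
  have : calculate_load grid
      = ((PySem.List.enumerate grid 0).map
          (fun p => ((grid.length : Int) - p.1) * (PySem.List.count p.2 "O" : Int))).sum := by
    simpa [calculate_load, PySem.List.enumerate_eq_map_pyRange grid [], List.map_map] using hA
  rw [this]
  simpa [calculate_load_alt] using hB.symm

-- ===== VERDICT (by name: the statement is the Claim_ definition above) =====
theorem calculate_load_spec : Claim_equal_calculate_load := by
  intro grid _
  exact pv_eq grid
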